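-- pv_equiv track=rewrite | github.com/hahyuning/Coding-test-study | problem_solving/2022/03/220326/220326_5.py | solution
-- ===== SOURCE A (Python) =====
-- from itertools import combinations
-- from copy import deepcopy
--
-- def solution(abilities, k):
--     ans = 0
--     n = len(abilities)
--     c_list = combinations([i for i in range((n + 1) // 2)], k)
--     abilities.sort()
--
--     for c in c_list:
--         score = 0
--         tmp = deepcopy(abilities)
--         for i in range((n + 1) // 2):
--             if i == (n + 1) // 2 - 1:
--                 if len(tmp) == 1:
--                     if i in c:
--                         score += tmp[-1]
--                 else:
--                     if i in c:
--                         score += tmp[-1]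
--                     else:
--                         score += tmp[0]
--             else:
--                 if i in c:
--                     score += tmp.pop()
--                     tmp.pop()
--                 else:
--                     tmp.pop()
--                     score += tmp.pop()
--
--         ans = max(ans, score)
--
--     return ans
-- ===== SOURCE B (Python) =====
-- # Greedy: pair the sorted abilities from the top; picking a pair adds its larger
-- # element instead of its smaller, i.e. the pair's difference on top of the base
-- # sum, so the best choice of exactly k pairs takes the k largest differences.
-- # Like A, this sorts `abilities` in place; the return value is what is compared.
-- def solution(abilities, k):
--     abilities.sort()
--     n = len(abilities)
--     m = (n + 1) // 2
--     if k < 0 or k > m: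
--         return 0
--     base = 0
--     diffs = []
--     rest = abilities[::-1]          # largest first
--     while len(rest) >= 2:
--         base += rest[1]
--         diffs.append(rest[0] - rest[1])
--         rest = rest[2:]
--     if rest:                        # odd n: the lone smallest element
--         diffs.append(rest[0])
--     diffs.sort(reverse=True)
--     return max(0, base + sum(diffs[:k]))
-- ===== Notes on version B (the rewrite author's own statement) =====
-- stated objective: faster
-- what changed: Replaced the exhaustive scan over all C(m,k) pair-choices (each re-simulated with list pops on a deep copy) by a single greedy pass: sum of the smaller element of each pair plus the k largest pair-differences, so no combinatorial enumeration remains.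
import Mathlib
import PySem

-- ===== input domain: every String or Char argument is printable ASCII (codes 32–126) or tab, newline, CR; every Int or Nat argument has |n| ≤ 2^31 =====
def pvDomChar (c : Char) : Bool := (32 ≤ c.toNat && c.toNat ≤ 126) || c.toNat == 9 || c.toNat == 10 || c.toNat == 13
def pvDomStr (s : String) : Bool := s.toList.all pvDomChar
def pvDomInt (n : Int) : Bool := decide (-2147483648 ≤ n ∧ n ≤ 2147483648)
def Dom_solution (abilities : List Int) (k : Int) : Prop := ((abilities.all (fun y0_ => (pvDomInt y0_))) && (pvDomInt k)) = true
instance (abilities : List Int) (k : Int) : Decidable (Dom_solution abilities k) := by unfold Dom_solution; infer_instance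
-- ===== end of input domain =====

-- B replaces A's exhaustive scan over all C(m,k) pair-choices by one greedy pass
-- (base sum of pair minima plus the k largest pair differences); both Pythons sort
-- `abilities` in place, and the equivalence proved is about the return value.

-- ===== PORT A =====
-- one iteration of A's inner loop (i is the loop index, c the chosen combination,
-- m = (n+1)//2, state = (tmp, score)); tmp.pop() is split into reading the last
-- element (tmp is provably nonempty at every pop/tmp[-1]/tmp[0], so getD 0 is
-- never the Python-raising case) and dropLast
def aStep (c : List Nat) (m : Nat) (st : List Int × Int) (i : Nat) : List Int × Int :=
  if i = m - 1 then
    if st.1.length = 1 then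
      if i ∈ c then (st.1, st.2 + st.1.getLast?.getD 0) else (st.1, st.2)
    else
      if i ∈ c then (st.1, st.2 + st.1.getLast?.getD 0)      -- score += tmp[-1]
      else (st.1, st.2 + st.1.head?.getD 0)                  -- score += tmp[0]
  else
    if i ∈ c then (st.1.dropLast.dropLast, st.2 + st.1.getLast?.getD 0)
    else (st.1.dropLast.dropLast, st.2 + st.1.dropLast.getLast?.getD 0)

-- A's inner loop: score for one combination c
def aScore (c : List Nat) (m : Nat) (s : List Int) : Int :=
  ((List.range m).foldl (aStep c m) (s, 0)).2

def solution (abilities : List Int) (k : Int) : Int :=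
  let n := abilities.length
  let m := (n + 1) / 2
  let s := PySem.List.sorted abilities (fun x => x) false    -- abilities.sort()
  if 0 ≤ k then
    -- itertools.combinations(range(m), k): the length-k sublists of [0..m-1]
    (List.sublistsLen k.toNat (List.range m)).foldl
      (fun ans c => max ans (aScore c m s)) 0
  else 0  -- Python: combinations raises ValueError for k < 0 (outside Pre_)

-- ===== PORT B =====
-- B's while-loop: from the largest element down, accumulate the smaller of each
-- pair (base) and the pair differences; a lone last element becomes its own diff
def bPairs : List Int → Int × List Int
  | a :: b :: r => let q := bPairs r; (q.1 + b, (a - b) :: q.2)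
  | [a] => (0, [a])
  | [] => (0, [])

def solution_alt (abilities : List Int) (k : Int) : Int :=
  let s := PySem.List.sorted abilities (fun x => x) false     -- abilities.sort()
  let n := s.length
  let m := (n + 1) / 2
  if k < 0 ∨ (m : Int) < k then 0
  else
    let p := bPairs s.reverse                                 -- rest = abilities[::-1]
    let diffs := PySem.List.sorted p.2 (fun x => x) true      -- diffs.sort(reverse=True)
    max 0 (p.1 + (diffs.take k.toNat).sum)                    -- max(0, base + sum(diffs[:k]))

-- ===== PRECONDITION & SPEC =====
-- Pre_ excludes only k < 0, where A raises ValueError (itertools.combinations);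
-- B returns 0 there.
def Pre_solution (abilities : List Int) (k : Int) : Prop := 0 ≤ k
instance (abilities : List Int) (k : Int) : Decidable (Pre_solution abilities k) := by
  unfold Pre_solution; infer_instance

def pvWitness_solution : List Int × Int := ([3, 1, 2], 1)

def Spec_solution (abilities : List Int) (k : Int) (out : Int) : Prop := out = solution_alt abilities k
instance (abilities : List Int) (k : Int) (out : Int) : Decidable (Spec_solution abilities k out) := by
  unfold Spec_solution; infer_instance

-- ===== CLAIM (what is proved, stated in full; the proofs are below) =====
def Claim_equal_solution : Prop := ∀ (abilities : List Int) (k : Int), Dom_solution abilities k → Pre_solution abilities k → Spec_solution abilities k (solution abilities k)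

-- ===== LEMMAS AND PROOFS =====

-- index shift used to peel the first loop iteration: i ∈ shiftC c ↔ i+1 ∈ c
def shiftC (c : List Nat) : List Nat :=
  c.filterMap (fun j => match j with | 0 => none | Nat.succ j => some j)

theorem mem_shiftC (c : List Nat) (i : Nat) : i ∈ shiftC c ↔ i + 1 ∈ c := by
  simp only [shiftC, List.mem_filterMap]
  constructor
  · rintro ⟨j, hj, hje⟩
    cases j with
    | zero => simp at hje
    | succ j => simp only [Option.some.injEq] at hje; subst hje; exact hj
  · intro h
    exact ⟨i + 1, h, rfl⟩

theorem shiftC_map_succ (c : List Nat) : shiftC (c.map Nat.succ) = c := by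
  induction c with
  | nil => rfl
  | cons x t ih => simp [shiftC]

-- the "chosen diffs" sum: SS c d adds d[i] for each i ∈ c (c a sublist of range)
def SS : List Nat → List Int → Int
  | _, [] => 0
  | c, x :: xs => (if 0 ∈ c then x else 0) + SS (shiftC c) xs


-- the score accumulator is additive and does not influence the tmp evolution
theorem aStep_shift (c : List Nat) (m : Nat) (tmp : List Int) (v : Int) (i : Nat) :
    aStep c m (tmp, v) i = ((aStep c m (tmp, 0) i).1, v + (aStep c m (tmp, 0) i).2) := by
  unfold aStep; split_ifs <;> simp

theorem aFold_shift (c : List Nat) (m : Nat) :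
    ∀ (l : List Nat) (tmp : List Int) (v : Int),
      l.foldl (aStep c m) (tmp, v)
        = ((l.foldl (aStep c m) (tmp, 0)).1, v + (l.foldl (aStep c m) (tmp, 0)).2) := by
  intro l
  induction l with
  | nil => intro tmp v; simp
  | cons i t ih =>
    intro tmp v
    simp only [List.foldl_cons]
    rw [aStep_shift, ih, ih ((aStep c m (tmp, 0) i).1) ((aStep c m (tmp, 0) i).2)]
    simp [add_assoc]

-- with the loop index shifted by one, A's step is the step for m-1 and shiftC c
theorem aStep_succ (c : List Nat) (m : Nat) (hm : 2 ≤ m) (st : List Int × Int) (i : Nat) :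
    aStep c m st (i + 1) = aStep (shiftC c) (m - 1) st i := by
  unfold aStep
  simp only [show (i + 1 = m - 1) ↔ (i = m - 1 - 1) from by omega,
    show ((i + 1) ∈ c) ↔ i ∈ shiftC c from (mem_shiftC c i).symm]

-- peel the first iteration of A's loop (it handles the top pair when m ≥ 2)
theorem aScore_rec (c : List Nat) (m : Nat) (hm : 2 ≤ m) (s : List Int) :
    aScore c m s
      = (if 0 ∈ c then s.getLast?.getD 0 else s.dropLast.getLast?.getD 0)
          + aScore (shiftC c) (m - 1) s.dropLast.dropLast := by
  have hrange : List.range m = 0 :: (List.range (m - 1)).map Nat.succ := by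
    conv_lhs => rw [show m = (m - 1) + 1 from by omega]
    rw [List.range_succ_eq_map]
  unfold aScore
  rw [hrange]
  simp only [List.foldl_cons, List.foldl_map]
  have hstep : (fun (st : List Int × Int) (i : Nat) => aStep c m st (Nat.succ i))
      = aStep (shiftC c) (m - 1) := by
    funext st i; exact aStep_succ c m hm st i
  rw [hstep]
  have h0 : aStep c m (s, 0) 0
      = (s.dropLast.dropLast,
         if 0 ∈ c then s.getLast?.getD 0 else s.dropLast.getLast?.getD 0) := by
    unfold aStep
    rw [if_neg (show ¬(0 = m - 1) from by omega)]
    split_ifs <;> simp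
  rw [h0, aFold_shift]

theorem bPairs_len : ∀ r : List Int, (bPairs r).2.length = (r.length + 1) / 2 := by
  intro r
  induction r using bPairs.induct with
  | case1 a b r ih => simp [bPairs, ih]; omega
  | case2 a => simp [bPairs]
  | case3 => simp [bPairs]

-- A's inner loop, characterised: base sum of bPairs plus the chosen differences
theorem aScore_eq (r : List Int) :
    ∀ c, aScore c ((r.length + 1) / 2) r.reverse = (bPairs r).1 + SS c (bPairs r).2 := by
  induction r using bPairs.induct with
  | case1 b a r' ih =>
    intro c
    cases r' with
    | nil =>
      -- r = [b, a]: m = 1, one last-iteration step on tmp = [a, b]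
      simp [aScore, aStep, bPairs, SS, List.range_succ]
      split_ifs <;> ring
    | cons y t =>
      -- r = b :: a :: r' with r' ≠ []: m ≥ 2, peel the top pair
      have hm : 2 ≤ ((b :: a :: y :: t).length + 1) / 2 := by simp; omega
      have hrev : (b :: a :: y :: t).reverse = ((y :: t).reverse ++ [a]) ++ [b] := by
        simp
      rw [hrev, aScore_rec _ _ hm]
      simp only [List.dropLast_concat, List.getLast?_concat, Option.getD_some]
      have hm1 : ((b :: a :: y :: t).length + 1) / 2 - 1 = ((y :: t).length + 1) / 2 := by
        simp; omega
      rw [hm1, ih]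
      simp only [bPairs, SS]
      split_ifs <;> ring
  | case2 x =>
    intro c
    simp [aScore, aStep, bPairs, SS, List.range_succ]
    split_ifs <;> simp
  | case3 =>
    intro c
    simp [aScore, bPairs, SS]


theorem shiftC_cons_zero (c : List Nat) : shiftC (0 :: c) = shiftC c := rfl

-- SS over a sublist of the index range is the sum of the selected entries
theorem SS_eq_sum : ∀ (d : List Int) (c : List Nat), List.Sublist c (List.range d.length) →
    SS c d = (c.map (fun i => d.getD i 0)).sum := by
  intro d
  induction d with
  | nil =>
    intro c hc
    rw [List.length_nil, List.range_zero] at hc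
    rw [List.sublist_nil.mp hc]; rfl
  | cons x xs ih =>
    intro c hc
    rw [List.length_cons, List.range_succ_eq_map] at hc
    rcases List.sublist_cons_iff.mp hc with h | ⟨r, rfl, hr⟩
    · rcases List.sublist_map_iff.mp h with ⟨c0, hc0, rfl⟩
      have h0 : (0 : Nat) ∉ c0.map Nat.succ := by simp
      simp only [SS, if_neg h0, shiftC_map_succ, zero_add]
      rw [ih c0 hc0, List.map_map]
      simp [Function.comp_def]
    · rcases List.sublist_map_iff.mp hr with ⟨c0, hc0, rfl⟩
      simp only [SS, List.mem_cons, shiftC_cons_zero, shiftC_map_succ]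
      rw [ih c0 hc0, List.map_cons, List.sum_cons, List.map_map]
      simp [Function.comp_def]

theorem map_getD_range : ∀ d : List Int, (List.range d.length).map (fun i => d.getD i 0) = d := by
  intro d
  induction d with
  | nil => rfl
  | cons x xs ih =>
    rw [List.length_cons, List.range_succ_eq_map, List.map_cons, List.map_map]
    simpa [Function.comp_def] using ih

-- a sublist of a descending list is dominated by its first elements
theorem sublist_sum_le : ∀ {u v : List Int}, List.Sublist u v →
    v.Pairwise (fun a b : Int => b ≤ a) → u.sum ≤ (v.take u.length).sum := by
  intro u v h
  induction h with
  | slnil => intro _; simp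
  | @cons u' v' a h ih =>
    intro hp
    have h1 := ih (List.Pairwise.of_cons hp)
    cases u' with
    | nil => simp
    | cons x t =>
      have hlen : t.length + 1 ≤ v'.length := by simpa using h.length_le
      have hlt : t.length < v'.length := by omega
      have h2 : v'.take (t.length + 1) = v'.take t.length ++ [v'[t.length]] := by
        rw [List.take_add_one]; simp [List.getElem?_eq_getElem hlt]
      have h3 : v'[t.length] ≤ a := List.rel_of_pairwise_cons hp (List.getElem_mem hlt)
      simp only [List.length_cons, List.take_succ_cons, List.sum_cons]
      have h4 : (x :: t).sum ≤ (v'.take (t.length + 1)).sum := by simpa using h1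
      rw [h2, List.sum_append, List.sum_cons] at h4
      simp only [List.sum_cons, List.sum_nil, add_zero] at h4
      linarith
  | @cons₂ u' v' a h ih =>
    intro hp
    simp only [List.sum_cons, List.length_cons, List.take_succ_cons]
    have := ih (List.Pairwise.of_cons hp); linarith

theorem subperm_sum_le (v u : List Int) (hp : v.Pairwise (fun a b : Int => b ≤ a))
    (h : List.Subperm u v) : u.sum ≤ (v.take u.length).sum := by
  obtain ⟨w, hw, hsub⟩ := h
  have h1 := sublist_sum_le hsub hp
  rwa [hw.sum_eq, hw.length_eq] at h1

-- upper bound for A's running max over the combinations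
theorem foldl_max_le {α : Type} (f : α → Int) :
    ∀ (L : List α) (init M : Int), init ≤ M → (∀ x ∈ L, f x ≤ M) →
      L.foldl (fun a x => max a (f x)) init ≤ M := by
  intro L
  induction L with
  | nil => intro init M h _; simpa using h
  | cons x t ih =>
    intro init M h hall
    simp only [List.foldl_cons]
    exact ih _ _ (max_le h (hall x (by simp))) (fun y hy => hall y (by simp [hy]))

theorem sublistsLen_nil_of_lt (m κ : Nat) (h : m < κ) :
    List.sublistsLen κ (List.range m) = [] := by
  rw [List.eq_nil_iff_forall_not_mem]
  intro c hc
  rw [List.mem_sublistsLen] at hc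
  have h1 := hc.1.length_le
  rw [hc.2, List.length_range] at h1
  omega



-- ===== VERDICT (by name: the statement is the Claim_ definition above) =====
theorem solution_spec : Claim_equal_solution := by
  intro abilities k _ hpre
  unfold Pre_solution at hpre
  unfold Spec_solution
  simp only [solution, solution_alt]
  rw [if_pos hpre]
  set s := PySem.List.sorted abilities (fun x => x) false with hs
  have hlen : s.length = abilities.length := PySem.List.length_sorted ..
  rw [hlen]
  set m := (abilities.length + 1) / 2 with hm
  set κ := k.toNat with hκ
  by_cases hbig : (m : Int) < k
  · rw [if_pos (Or.inr hbig), sublistsLen_nil_of_lt m κ (by omega)]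
    rfl
  · rw [if_neg (by push Not; exact ⟨by omega, by omega⟩)]
    have hκm : κ ≤ m := by omega
    set q := bPairs s.reverse with hq
    have hdlen : q.2.length = m := by
      rw [hq, bPairs_len]; simp [hlen, hm]
    set sd := PySem.List.sorted q.2 (fun x => x) true with hsd
    have hperm : List.Perm sd q.2 := PySem.List.sorted_perm ..
    have hpw : sd.Pairwise (fun a b : Int => b ≤ a) := PySem.List.sorted_pairwise_rev ..
    have hsdlen : sd.length = m := by rw [hperm.length_eq, hdlen]
    have hscore : ∀ c, aScore c m s = q.1 + SS c q.2 := by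
      intro c
      have h1 := aScore_eq s.reverse c
      rwa [List.reverse_reverse, show (s.reverse.length + 1) / 2 = m by simp [hlen, hm]] at h1
    set T := q.1 + (sd.take κ).sum with hT
    have hub : ∀ c ∈ List.sublistsLen κ (List.range m), aScore c m s ≤ T := by
      intro c hc
      rw [List.mem_sublistsLen] at hc
      rw [hscore]
      have hsub : List.Sublist (c.map (fun i => q.2.getD i 0)) q.2 := by
        conv_rhs => rw [← map_getD_range q.2]
        exact List.Sublist.map _ (by rw [hdlen]; exact hc.1)
      have hss : SS c q.2 = (c.map (fun i => q.2.getD i 0)).sum :=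
        SS_eq_sum q.2 c (by rw [hdlen]; exact hc.1)
      have hsp : List.Subperm (c.map (fun i => q.2.getD i 0)) sd :=
        hsub.subperm.trans hperm.symm.subperm
      have h1 := subperm_sum_le sd _ hpw hsp
      rw [List.length_map, hc.2] at h1
      rw [hss, hT]
      linarith
    have hatt : ∃ c ∈ List.sublistsLen κ (List.range m), aScore c m s = T := by
      have htk : List.Subperm (sd.take κ) q.2 :=
        (List.take_sublist ..).subperm.trans hperm.subperm
      obtain ⟨w, hwperm, hwsub⟩ := htk
      rw [← map_getD_range q.2, hdlen] at hwsub
      obtain ⟨c0, hc0, rfl⟩ := List.sublist_map_iff.mp hwsub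
      have hlc : c0.length = κ := by
        have h1 := hwperm.length_eq
        rw [List.length_map, List.length_take, hsdlen] at h1
        omega
      refine ⟨c0, List.mem_sublistsLen.mpr ⟨hc0, hlc⟩, ?_⟩
      rw [hscore, SS_eq_sum q.2 c0 (by rw [hdlen]; exact hc0), hwperm.sum_eq, hT]
    obtain ⟨c0, hc0mem, hc0val⟩ := hatt
    have hA_le : (List.sublistsLen κ (List.range m)).foldl
        (fun ans c => max ans (aScore c m s)) 0 ≤ max 0 T :=
      foldl_max_le _ _ _ _ (le_max_left 0 T)
        (fun c hc => le_trans (hub c hc) (le_max_right 0 T))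
    have hge := PySem.List.le_foldl_max_int (List.sublistsLen κ (List.range m))
      (fun c => aScore c m s) 0
    have hA_ge : max 0 T ≤ (List.sublistsLen κ (List.range m)).foldl
        (fun ans c => max ans (aScore c m s)) 0 :=
      max_le hge.1 (hc0val ▸ hge.2 c0 hc0mem)
    exact le_antisymm hA_le hA_ge
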